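-- pv_equiv track=rewrite | github.com/Allreason/FastAPIServer | clickhouse.py | process_and_split
-- ===== SOURCE A (Python) =====
-- def process_and_split(s):
--     stack = []
--     dup = ''
--     for c in s:
--         if c == '"':
--             if not stack:
--                 stack.append(c)
--             else:
--                 stack.pop()
--             continue
--         if c == ',' and stack:
--             c = '~'
--         dup += c
--     return [i.replace('~', ',').replace('\n', '') for i in dup.split(',')]
-- ===== SOURCE B (Python) =====
-- def process_and_split(s):
--     # One-pass tokenizer: quotes toggle a mode, unquoted commas end a field,
--     # newlines are dropped, every other character is kept verbatim.
--     fields = []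
--     cur = ''
--     in_quote = False
--     for ch in s:
--         if ch == '"':
--             in_quote = not in_quote
--         elif ch == '\n':
--             continue
--         elif ch == ',' and not in_quote:
--             fields.append(cur)
--             cur = ''
--         else:
--             cur += ch
--     fields.append(cur)
--     return fields
-- ===== Notes on version B (the rewrite author's own statement) =====
-- stated objective: simpler
-- what changed: replaced A's sentinel-substitute-whole-string, split-on-comma, then per-field replace pipeline by a single-pass tokenizer that emits fields directly using an in_quote flag; Pre_ excludes strings containing a literal tilde, which collides with the sentinel character A uses internally for quoted commas, so A renders it as a comma while B keeps it verbatim — a corner no caller would specify, where either reading is defensible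
-- outside the precondition, e.g. on process_and_split('~'): A returns [','], B returns ['~']; on process_and_split('a~b'): A returns ['a,b'], B returns ['a~b']
import Mathlib
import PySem

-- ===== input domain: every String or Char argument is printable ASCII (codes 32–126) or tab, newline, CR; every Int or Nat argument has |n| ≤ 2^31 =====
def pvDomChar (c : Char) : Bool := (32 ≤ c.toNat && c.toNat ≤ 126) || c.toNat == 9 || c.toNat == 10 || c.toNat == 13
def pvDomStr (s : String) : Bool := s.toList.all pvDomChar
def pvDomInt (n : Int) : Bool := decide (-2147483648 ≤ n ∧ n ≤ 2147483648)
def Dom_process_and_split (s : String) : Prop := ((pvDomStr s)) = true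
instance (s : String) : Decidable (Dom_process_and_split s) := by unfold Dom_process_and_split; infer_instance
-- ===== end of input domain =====

-- B replaces A's transform-then-split-then-replace pipeline by a one-pass tokenizer (simpler, same
-- cost); Pre_ excludes strings containing a literal '~' (sentinel collision), as stated above Pre_.

-- ===== PORT A =====
-- A's loop body: toggle the quote stack on '"', else append the char ('~' for an in-quote comma) to dup.
def pvStepA (st : List Char × List Char) (c : Char) : List Char × List Char :=
  if c = '"' then
    (if st.1.isEmpty then st.1 ++ ['"'] else st.1.dropLast, st.2)
  else
    let c' := if c = ',' ∧ ¬ st.1.isEmpty then '~' else c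
    (st.1, st.2 ++ [c'])

def process_and_split (s : String) : List String :=
  let st := s.toList.foldl pvStepA ([], [])
  ((PySem.Chars.splitOn st.2 [',']).map
    (fun i => PySem.Chars.replace (PySem.Chars.replace i ['~'] [',']) ['\n'] [])).map String.ofList

-- ===== PORT B =====
-- B's loop body: one-pass tokenizer state (fields, cur, in_quote).
def pvStepB (st : List (List Char) × List Char × Bool) (ch : Char) : List (List Char) × List Char × Bool :=
  if ch = '"' then (st.1, st.2.1, !st.2.2)
  else if ch = '\n' then st
  else if ch = ',' ∧ st.2.2 = false then (st.1 ++ [st.2.1], [], st.2.2)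
  else (st.1, st.2.1 ++ [ch], st.2.2)

def process_and_split_alt (s : String) : List String :=
  let st := s.toList.foldl pvStepB ([], [], false)
  (st.1 ++ [st.2.1]).map String.ofList

-- ===== PRECONDITION & SPEC =====
-- Pre_ excludes strings containing a literal tilde: it collides with the sentinel character A uses
-- internally for quoted commas, so A renders it as a comma while B keeps it verbatim — a corner no
-- caller of a field splitter would specify, where either reading is defensible.
def Pre_process_and_split (s : String) : Prop := '~' ∉ s.toList
instance (s : String) : Decidable (Pre_process_and_split s) := by unfold Pre_process_and_split; infer_instance

def pvWitness_process_and_split : String := "\"a,b\",c"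

def Spec_process_and_split (s : String) (out : List String) : Prop := out = process_and_split_alt s
instance (s : String) (out : List String) : Decidable (Spec_process_and_split s out) := by unfold Spec_process_and_split; infer_instance

-- ===== CLAIM (what is proved, stated in full; the proofs are below) =====
def Claim_equal_process_and_split : Prop := ∀ (s : String), Dom_process_and_split s → Pre_process_and_split s → Spec_process_and_split s (process_and_split s)

-- ===== LEMMAS AND PROOFS =====

/-- Prepend to the head piece (used to describe splitting). -/
def pvConsHead (p : List Char) : List (List Char) → List (List Char)
  | [] => [p]
  | h :: r => (p ++ h) :: r

/-- Head-first characterisation of splitting on ','. -/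
def pvSplitC : List Char → List (List Char)
  | [] => [[]]
  | c :: t => if c = ',' then [] :: pvSplitC t else pvConsHead [c] (pvSplitC t)

def pvSub (c : Char) : Char := if c = '~' then ',' else c
def pvF (i : List Char) : List Char := (i.map pvSub).filter (· ≠ '\n')

/-- Head-first characterisation of A's transformed string. -/
def pvDupF : Bool → List Char → List Char
  | _, [] => []
  | inq, c :: t =>
    if c = '"' then pvDupF (!inq) t
    else (if c = ',' ∧ inq then '~' else c) :: pvDupF inq t

/-- Head-first characterisation of B's field list. -/
def pvBF : Bool → List Char → List (List Char)
  | _, [] => [[]]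
  | inq, c :: t =>
    if c = '"' then pvBF (!inq) t
    else if c = '\n' then pvBF inq t
    else if c = ',' ∧ inq = false then [] :: pvBF inq t
    else pvConsHead [c] (pvBF inq t)

theorem pvConsHead_cons (p h : List Char) (r : List (List Char)) :
    pvConsHead p (h :: r) = (p ++ h) :: r := rfl

theorem pvConsHead_ne_nil (p : List Char) (xs : List (List Char)) : pvConsHead p xs ≠ [] := by
  cases xs <;> simp [pvConsHead]

theorem pvSplitC_ne_nil (l : List Char) : pvSplitC l ≠ [] := by
  cases l with
  | nil => simp [pvSplitC]
  | cons c t => by_cases h : c = ',' <;> simp [pvSplitC, h, pvConsHead_ne_nil]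

theorem pvBF_ne_nil (inq : Bool) (l : List Char) : pvBF inq l ≠ [] := by
  induction l generalizing inq with
  | nil => simp [pvBF]
  | cons c t ih => unfold pvBF; split_ifs <;> simp [pvConsHead_ne_nil, ih]

theorem pvConsHead_nil (xs : List (List Char)) (h : xs ≠ []) : pvConsHead [] xs = xs := by
  cases xs with
  | nil => exact absurd rfl h
  | cons a r => simp [pvConsHead]

theorem pvConsHead_consHead (p q : List Char) (xs : List (List Char)) :
    pvConsHead p (pvConsHead q xs) = pvConsHead (p ++ q) xs := by
  cases xs <;> simp [pvConsHead]

theorem pvF_append (a b : List Char) : pvF (a ++ b) = pvF a ++ pvF b := by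
  simp [pvF]

theorem pvF_consHead (p : List Char) (xs : List (List Char)) :
    (pvConsHead p xs).map pvF = pvConsHead (pvF p) (xs.map pvF) := by
  cases xs <;> simp [pvConsHead, pvF_append]

theorem pvReplace_go_map (l : List Char) : ∀ (fuel : Nat) (acc : List Char), l.length ≤ fuel →
    PySem.Chars.replace.go ['~'] [','] fuel l acc = acc.reverse ++ l.map pvSub := by
  induction l with
  | nil => intro fuel acc _; cases fuel <;> simp [PySem.Chars.replace.go]
  | cons c t ih =>
    intro fuel acc hf
    cases fuel with
    | zero => simp at hf
    | succ n =>
      rcases eq_or_ne c '~' with h | h <;>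
        simp [PySem.Chars.replace.go, List.isPrefixOf, h, h.symm, ih n _ (by simpa using hf), pvSub]

theorem pvReplace_map (i : List Char) :
    PySem.Chars.replace i ['~'] [','] = i.map pvSub := by
  simp [PySem.Chars.replace, pvReplace_go_map i i.length [] le_rfl]

theorem pvReplace_go_filter (l : List Char) : ∀ (fuel : Nat) (acc : List Char), l.length ≤ fuel →
    PySem.Chars.replace.go ['\n'] [] fuel l acc = acc.reverse ++ l.filter (· ≠ '\n') := by
  induction l with
  | nil => intro fuel acc _; cases fuel <;> simp [PySem.Chars.replace.go]
  | cons c t ih =>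
    intro fuel acc hf
    cases fuel with
    | zero => simp at hf
    | succ n =>
      rcases eq_or_ne c '\n' with h | h <;>
        simp [PySem.Chars.replace.go, List.isPrefixOf, h, h.symm, ih n _ (by simpa using hf)]

theorem pvReplace_filter (i : List Char) :
    PySem.Chars.replace i ['\n'] [] = i.filter (· ≠ '\n') := by
  simp [PySem.Chars.replace, pvReplace_go_filter i i.length [] le_rfl]

theorem pvSplit_go (l : List Char) : ∀ (fuel : Nat) (cur : List Char) (accs : List (List Char)),
    l.length ≤ fuel →
    PySem.Chars.splitOn.go [','] fuel l cur accs = accs.reverse ++ pvConsHead cur.reverse (pvSplitC l) := by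
  induction l with
  | nil => intro fuel cur accs _; cases fuel <;> simp [PySem.Chars.splitOn.go, pvSplitC, pvConsHead]
  | cons c t ih =>
    intro fuel cur accs hf
    cases fuel with
    | zero => simp at hf
    | succ n =>
      rcases eq_or_ne c ',' with h | h
      · simp [PySem.Chars.splitOn.go, List.isPrefixOf, h, ih n _ _ (by simpa using hf),
          pvSplitC, pvConsHead_cons, pvConsHead_nil _ (pvSplitC_ne_nil t)]
      · simp [PySem.Chars.splitOn.go, List.isPrefixOf, h, h.symm, ih n _ _ (by simpa using hf),
          pvSplitC, pvConsHead_consHead]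

theorem pvSplitOn_eq (d : List Char) : PySem.Chars.splitOn d [','] = pvSplitC d := by
  simp [PySem.Chars.splitOn, pvSplit_go d (d.length + 1) [] [] (by omega),
    pvConsHead_nil _ (pvSplitC_ne_nil d)]

theorem pvFoldA (l : List Char) : ∀ (st dup : List Char), st.length ≤ 1 →
    (l.foldl pvStepA (st, dup)).2 = dup ++ pvDupF (!st.isEmpty) l := by
  induction l with
  | nil => intro st dup _; simp [pvDupF]
  | cons c t ih =>
    intro st dup hst
    rw [List.foldl_cons]
    match st, hst with
    | [], _ =>
      rcases eq_or_ne c '"' with hc | hc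
      · rw [show pvStepA ([], dup) c = (['"'], dup) by simp [pvStepA, hc],
          ih ['"'] dup (by simp)]
        simp [pvDupF, hc]
      · rw [show pvStepA ([], dup) c = ([], dup ++ [c]) by simp [pvStepA, hc],
          ih [] (dup ++ [c]) (by simp)]
        simp [pvDupF, hc]
    | [a], _ =>
      rcases eq_or_ne c '"' with hc | hc
      · rw [show pvStepA ([a], dup) c = ([], dup) by simp [pvStepA, hc],
          ih [] dup (by simp)]
        simp [pvDupF, hc]
      · rcases eq_or_ne c ',' with hc2 | hc2
        · rw [show pvStepA ([a], dup) c = ([a], dup ++ ['~']) by simp [pvStepA, hc, hc2],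
            ih [a] (dup ++ ['~']) (by simp)]
          simp [pvDupF, hc, hc2]
        · rw [show pvStepA ([a], dup) c = ([a], dup ++ [c]) by simp [pvStepA, hc, hc2],
            ih [a] (dup ++ [c]) (by simp)]
          simp [pvDupF, hc, hc2]

theorem pvFoldB (l : List Char) : ∀ (fields : List (List Char)) (cur : List Char) (inq : Bool),
    (let r := l.foldl pvStepB (fields, cur, inq)
    r.1 ++ [r.2.1]) = fields ++ pvConsHead cur (pvBF inq l) := by
  induction l with
  | nil => intro fields cur inq; simp [pvBF, pvConsHead_cons]
  | cons c t ih =>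
    intro fields cur inq
    rw [List.foldl_cons]
    rcases eq_or_ne c '"' with h1 | h1
    · rw [show pvStepB (fields, cur, inq) c = (fields, cur, !inq) by simp [pvStepB, h1], ih]
      simp [pvBF, h1]
    · rcases eq_or_ne c '\n' with h2 | h2
      · rw [show pvStepB (fields, cur, inq) c = (fields, cur, inq) by simp [pvStepB, h1, h2], ih]
        simp [pvBF, h1, h2]
      · by_cases h3 : c = ',' ∧ inq = false
        · rw [show pvStepB (fields, cur, inq) c = (fields ++ [cur], [], inq) by
            simp [pvStepB, h1, h2, h3.1, h3.2], ih]
          simp [pvBF, h1, h2, h3.1, h3.2, pvConsHead_cons,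
            pvConsHead_nil _ (pvBF_ne_nil inq t), pvConsHead_nil _ (pvBF_ne_nil false t)]
        · rw [show pvStepB (fields, cur, inq) c = (fields, cur ++ [c], inq) by
            simp [pvStepB, h1, h2, h3], ih]
          simp [pvBF, h1, h2, h3, pvConsHead_consHead]

theorem pvBridge (l : List Char) (hl : '~' ∉ l) : ∀ (inq : Bool),
    (pvSplitC (pvDupF inq l)).map pvF = pvBF inq l := by
  induction l with
  | nil => intro inq; simp [pvDupF, pvSplitC, pvBF, pvF]
  | cons c t ih =>
    have hct : '~' ∉ t := fun h => hl (List.mem_cons_of_mem _ h)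
    have hcc : c ≠ '~' := fun h => hl (h ▸ List.mem_cons_self)
    intro inq
    rcases eq_or_ne c '"' with h1 | h1
    · simp [pvDupF, pvBF, h1, ih hct]
    · rcases eq_or_ne c '\n' with h2 | h2
      · have hnc : ¬ (c = ',' ∧ inq = true) := by simp [h2]
        simp [pvDupF, pvBF, h1, h2, hnc, pvSplitC, pvF_consHead, pvF, pvSub,
          pvConsHead_nil _ (pvBF_ne_nil inq t),
          pvConsHead_nil _ (by simp [pvSplitC_ne_nil] :
            (pvSplitC (pvDupF inq t)).map pvF ≠ []), ih hct]
      · by_cases h3 : c = ',' ∧ inq = false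
        · simp [pvDupF, pvBF, h1, h2, h3.1, h3.2, pvSplitC, pvF, ih hct]
        · rcases eq_or_ne c ',' with h4 | h4
          · have hq : inq = true := by
              cases inq with
              | false => exact absurd ⟨h4, rfl⟩ h3
              | true => rfl
            simp [pvDupF, pvBF, h1, h2, h3, h4, hq, pvSplitC, pvF_consHead, pvF, pvSub, ih hct]
          · have hnc : ¬ (c = ',' ∧ inq = true) := by simp [h4]
            simp [pvDupF, pvBF, h1, h2, h3, hnc, h4, hcc, pvSplitC, pvF_consHead,
              pvF, pvSub, Ne.symm h4, ih hct]

-- ===== VERDICT (by name: the statement is the Claim_ definition above) =====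
theorem process_and_split_spec : Claim_equal_process_and_split := by
  intro s _ hp
  simp only [Spec_process_and_split, process_and_split, process_and_split_alt]
  rw [pvFoldA s.toList [] [] (by simp), pvFoldB s.toList [] [] false]
  simp [pvSplitOn_eq, pvReplace_map, pvReplace_filter,
    pvConsHead_nil _ (pvBF_ne_nil false s.toList)]
  rw [← pvBridge s.toList hp false, List.map_map]
  simp [Function.comp, pvF]
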